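-- pv_equiv track=rewrite | github.com/jjoshua2/arc_agi | unsolved/2025-10-11T03-24-44Z/a64e4611_best1.py | transform
-- ===== SOURCE A (Python) =====
-- from collections import deque
--
-- def transform(grid_lst: list[list[int]]) -> list[list[int]]:
--     if not grid_lst or not grid_lst[0]:
--         return []
--     rows = len(grid_lst)
--     cols = len(grid_lst[0])
--     output = [row[:] for row in grid_lst]
--
--     def is_open(val: int) -> bool:
--         return val == 0
--
--     visited = [[False for _ in range(cols)] for _ in range(rows)]
--
--     # Directions: up, down, left, right
--     directions = [(-1, 0), (1, 0), (0, -1), (0, 1)]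
--
--     # BFS queue
--     q = deque()
--
--     # Add all border open cells to queue and mark visited
--     # Top row
--     for c in range(cols):
--         if is_open(grid_lst[0][c]):
--             q.append((0, c))
--             visited[0][c] = True
--     # Bottom row
--     for c in range(cols):
--         if is_open(grid_lst[rows - 1][c]):
--             q.append((rows - 1, c))
--             visited[rows - 1][c] = True
--     # Left column, excluding corners already added
--     for r in range(1, rows - 1):
--         if is_open(grid_lst[r][0]):
--             q.append((r, 0))
--             visited[r][0] = True
--     # Right column, excluding corners
--     for r in range(1, rows - 1):
--         if is_open(grid_lst[r][cols - 1]):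
--             q.append((r, cols - 1))
--             visited[r][cols - 1] = True
--
--     # Flood fill from border
--     while q:
--         r, c = q.popleft()
--         for dr, dc in directions:
--             nr, nc = r + dr, c + dc
--             if 0 <= nr < rows and 0 <= nc < cols and not visited[nr][nc] and is_open(grid_lst[nr][nc]):
--                 visited[nr][nc] = True
--                 q.append((nr, nc))
--
--     # Change enclosed open cells to 3
--     for r in range(rows):
--         for c in range(cols):
--             if is_open(grid_lst[r][c]) and not visited[r][c]:
--                 output[r][c] = 3
--
--     return output
-- ===== SOURCE B (Python) =====
-- def transform(grid_lst: list[list[int]]) -> list[list[int]]: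
--     if not grid_lst or not grid_lst[0]:
--         return []
--     rows, cols = len(grid_lst), len(grid_lst[0])
--     open_cells = {(r, c) for r in range(rows) for c in range(cols) if grid_lst[r][c] == 0}
--     reach = {(r, c) for (r, c) in open_cells if r == 0 or r == rows - 1 or c == 0 or c == cols - 1}
--     while True:
--         nxt = reach | {(r, c) for (r, c) in open_cells
--                        if (r - 1, c) in reach or (r + 1, c) in reach
--                        or (r, c - 1) in reach or (r, c + 1) in reach}
--         if nxt == reach:
--             break
--         reach = nxt
--     return [[3 if (r, c) in open_cells and (r, c) not in reach else v
--              for c, v in enumerate(row)] for r, row in enumerate(grid_lst)]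
-- ===== Notes on version B (the rewrite author's own statement) =====
-- stated objective: alternative
-- what changed: Replaced the BFS worklist flood fill (deque frontier, visited matrix, per-cell neighbour pushes) by a whole-set fixed-point iteration: build the set of open cells once, seed it with the border-open subset, and repeatedly replace the reachable set by itself union all open cells adjacent to it until the set stops changing.
import Mathlib
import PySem

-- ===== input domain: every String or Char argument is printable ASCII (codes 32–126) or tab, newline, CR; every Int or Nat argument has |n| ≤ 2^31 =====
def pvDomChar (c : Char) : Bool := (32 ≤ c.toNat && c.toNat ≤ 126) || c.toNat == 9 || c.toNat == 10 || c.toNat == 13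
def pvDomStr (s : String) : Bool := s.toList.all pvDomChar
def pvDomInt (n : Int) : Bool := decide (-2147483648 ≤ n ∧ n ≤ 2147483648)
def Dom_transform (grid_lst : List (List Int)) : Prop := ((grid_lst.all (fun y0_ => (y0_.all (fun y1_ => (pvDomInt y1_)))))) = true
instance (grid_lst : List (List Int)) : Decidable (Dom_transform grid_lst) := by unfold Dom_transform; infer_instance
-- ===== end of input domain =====

-- B replaces A's BFS worklist flood fill by a whole-set fixed-point iteration:
-- seed with the border-open cells and repeatedly union in all open cells adjacent
-- to the set until it stops changing (alternative algorithm, same result).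

-- ===== PORT A =====
-- grid access grid_lst[r][c]; every access A makes is in range on inputs satisfying
-- Pre_transform, where getD is exact.
def gget (g : List (List Int)) (r c : Nat) : Int := (g.getD r []).getD c 0

def cellsF (R C : Nat) : Finset (Nat × Nat) := Finset.range R ×ˢ Finset.range C

-- A's final section: deep copy, then set enclosed open cells to 3
def paint (g : List (List Int)) (C : Nat) (V : Finset (Nat × Nat)) : List (List Int) :=
  g.mapIdx (fun r row => row.mapIdx (fun c v => if c < C ∧ v = 0 ∧ (r, c) ∉ V then 3 else v))

-- the `visited` boolean matrix is represented as the set of coordinates marked True (exact)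
def dirs : List (Int × Int) := [(-1, 0), (1, 0), (0, -1), (0, 1)]

def tryAdd (g : List (List Int)) (R C : Nat) (p : Nat × Nat)
    (st : Finset (Nat × Nat) × List (Nat × Nat)) (d : Int × Int) :
    Finset (Nat × Nat) × List (Nat × Nat) :=
  if 0 ≤ (p.1 : Int) + d.1 ∧ (p.1 : Int) + d.1 < (R : Int) ∧
      0 ≤ (p.2 : Int) + d.2 ∧ (p.2 : Int) + d.2 < (C : Int) then
    if (((p.1 : Int) + d.1).toNat, ((p.2 : Int) + d.2).toNat) ∉ st.1 ∧
        gget g ((p.1 : Int) + d.1).toNat ((p.2 : Int) + d.2).toNat = 0 then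
      (insert (((p.1 : Int) + d.1).toNat, ((p.2 : Int) + d.2).toNat) st.1,
        st.2 ++ [(((p.1 : Int) + d.1).toNat, ((p.2 : Int) + d.2).toNat)])
    else st
  else st

-- termination helpers for A's BFS loop (cited by the port's decreasing_by)
lemma card_sdiff_insert_lt {D V : Finset (Nat × Nat)} {q : Nat × Nat}
    (hqD : q ∈ D) (hqV : q ∉ V) : (D \ insert q V).card < (D \ V).card := by
  apply Finset.card_lt_card
  refine ⟨Finset.sdiff_subset_sdiff (Finset.Subset.refl D) (Finset.subset_insert q V), ?_⟩
  intro hsub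
  have h1 : q ∈ D \ V := Finset.mem_sdiff.2 ⟨hqD, hqV⟩
  have h2 := hsub h1
  simp at h2

lemma foldl_grow_cases {α β : Type} (D : Finset (Nat × Nat))
    (f : Finset (Nat × Nat) × α → β → Finset (Nat × Nat) × α) :
    ∀ (l : List β) (st : Finset (Nat × Nat) × α),
      (∀ s x, x ∈ l → f s x = s ∨ ∃ q, q ∈ D ∧ q ∉ s.1 ∧ (f s x).1 = insert q s.1) →
      l.foldl f st = st ∨ (D \ (l.foldl f st).1).card < (D \ st.1).card := by
  intro l
  induction l with
  | nil => intro st _; exact Or.inl rfl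
  | cons x l ih =>
    intro st hf
    have hrest : ∀ s y, y ∈ l → f s y = s ∨ ∃ q, q ∈ D ∧ q ∉ s.1 ∧ (f s y).1 = insert q s.1 :=
      fun s y hy => hf s y (List.mem_cons_of_mem _ hy)
    rcases hf st x (List.mem_cons_self) with heq | ⟨q, hqD, hqV, hins⟩
    · simpa [List.foldl_cons, heq] using ih st hrest
    · right
      have hstep : (D \ (f st x).1).card < (D \ st.1).card := by
        rw [hins]; exact card_sdiff_insert_lt hqD hqV
      rcases ih (f st x) hrest with heq2 | hlt2
      · simpa [List.foldl_cons, heq2] using hstep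
      · calc (D \ ((x :: l).foldl f st).1).card
            = (D \ (l.foldl f (f st x)).1).card := by simp [List.foldl_cons]
          _ < (D \ (f st x).1).card := hlt2
          _ < (D \ st.1).card := hstep

lemma tryAdd_cases (g : List (List Int)) (R C : Nat) (p : Nat × Nat)
    (s : Finset (Nat × Nat) × List (Nat × Nat)) (d : Int × Int) :
    tryAdd g R C p s d = s ∨
      ∃ q, q ∈ cellsF R C ∧ q ∉ s.1 ∧ (tryAdd g R C p s d).1 = insert q s.1 := by
  unfold tryAdd
  split
  · rename_i hb
    split
    · rename_i hq
      right
      refine ⟨_, ?_, hq.1, rfl⟩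
      simp only [cellsF, Finset.mem_product, Finset.mem_range]
      omega
    · left; rfl
  · left; rfl

def bfs (g : List (List Int)) (R C : Nat) (V : Finset (Nat × Nat)) (Q : List (Nat × Nat)) :
    Finset (Nat × Nat) :=
  match Q with
  | [] => V
  | p :: Qt =>
    let st := dirs.foldl (tryAdd g R C p) (V, [])
    bfs g R C st.1 (Qt ++ st.2)
termination_by ((cellsF R C \ V).card, Q.length)
decreasing_by
  rcases foldl_grow_cases (cellsF R C) (tryAdd g R C p) dirs (V, [])
      (fun s x _ => tryAdd_cases g R C p s x) with heq | hlt
  · rw [heq]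
    exact Prod.Lex.right _ (by simp)
  · exact Prod.Lex.left _ _ hlt

-- the four border seed loops, in Python's order
def seedFold (g : List (List Int)) (ps : List (Nat × Nat))
    (st : Finset (Nat × Nat) × List (Nat × Nat)) : Finset (Nat × Nat) × List (Nat × Nat) :=
  ps.foldl (fun st p => if gget g p.1 p.2 = 0 then (insert p st.1, st.2 ++ [p]) else st) st

def seedState (g : List (List Int)) (R C : Nat) : Finset (Nat × Nat) × List (Nat × Nat) :=
  seedFold g ((List.range' 1 (R - 2)).map (fun r => (r, C - 1)))
    (seedFold g ((List.range' 1 (R - 2)).map (fun r => (r, 0)))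
      (seedFold g ((List.range C).map (fun c => (R - 1, c)))
        (seedFold g ((List.range C).map (fun c => (0, c))) (∅, []))))

def transform (grid_lst : List (List Int)) : List (List Int) :=
  if grid_lst = [] ∨ grid_lst.headD [] = [] then [] else
    paint grid_lst (grid_lst.headD []).length
      (bfs grid_lst grid_lst.length (grid_lst.headD []).length
        (seedState grid_lst grid_lst.length (grid_lst.headD []).length).1
        (seedState grid_lst grid_lst.length (grid_lst.headD []).length).2)

-- ===== PORT B =====
-- the Python set open_cells (set of coordinate pairs, built once)
def openCells (g : List (List Int)) (R C : Nat) : Finset (Nat × Nat) :=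
  (Finset.range R ×ˢ Finset.range C).filter (fun p => (g.getD p.1 []).getD p.2 0 = 0)

-- the initial reach set: open cells on the border
def borderOpen (g : List (List Int)) (R C : Nat) : Finset (Nat × Nat) :=
  (openCells g R C).filter (fun p => p.1 = 0 ∨ p.1 = R - 1 ∨ p.2 = 0 ∨ p.2 = C - 1)

-- one round: reach ∪ {open cells with a neighbour in reach}; the 0 < guards model
-- Python's tuples with coordinate -1, which are never members of the set (exact).
def expand (g : List (List Int)) (R C : Nat) (S : Finset (Nat × Nat)) : Finset (Nat × Nat) :=
  S ∪ (openCells g R C).filter (fun p =>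
    (0 < p.1 ∧ (p.1 - 1, p.2) ∈ S) ∨ (p.1 + 1, p.2) ∈ S ∨
    (0 < p.2 ∧ (p.1, p.2 - 1) ∈ S) ∨ (p.1, p.2 + 1) ∈ S)

-- termination helper for B's while-loop (cited by the port's decreasing_by)
lemma expand_card_progress (g : List (List Int)) (R C : Nat) (S : Finset (Nat × Nat))
    (h : ¬ expand g R C S = S) :
    ((Finset.range R ×ˢ Finset.range C) \ expand g R C S).card <
      ((Finset.range R ×ˢ Finset.range C) \ S).card := by
  have hsub : S ⊆ expand g R C S := Finset.subset_union_left
  obtain ⟨q, hq, hqS⟩ := Finset.exists_of_ssubset (hsub.ssubset_of_ne (fun e => h e.symm))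
  have hqU : q ∈ Finset.range R ×ˢ Finset.range C := by
    rcases Finset.mem_union.1 hq with hq' | hq'
    · exact absurd hq' hqS
    · exact Finset.mem_of_mem_filter q ((Finset.filter_subset _ _) hq')
  apply Finset.card_lt_card
  refine ⟨Finset.sdiff_subset_sdiff (Finset.Subset.refl _) hsub, fun hss => ?_⟩
  have := hss (Finset.mem_sdiff.2 ⟨hqU, hqS⟩)
  exact (Finset.mem_sdiff.1 this).2 hq

-- the while-loop: iterate until a round changes nothing
def iterExpand (g : List (List Int)) (R C : Nat) (S : Finset (Nat × Nat)) :
    Finset (Nat × Nat) :=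
  if expand g R C S = S then S else iterExpand g R C (expand g R C S)
termination_by ((Finset.range R ×ˢ Finset.range C) \ S).card
decreasing_by exact expand_card_progress g R C S (by assumption)

-- the output comprehension [[… for c, v in enumerate(row)] for r, row in enumerate(grid_lst)]
def paintB (g : List (List Int)) (opens reach : Finset (Nat × Nat)) : List (List Int) :=
  g.zipIdx.map (fun rrow => rrow.1.zipIdx.map (fun cv =>
    if (rrow.2, cv.2) ∈ opens ∧ (rrow.2, cv.2) ∉ reach then 3 else cv.1))

def transform_alt (grid_lst : List (List Int)) : List (List Int) :=
  if grid_lst = [] ∨ grid_lst.headD [] = [] then [] else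
    paintB grid_lst (openCells grid_lst grid_lst.length (grid_lst.headD []).length)
      (iterExpand grid_lst grid_lst.length (grid_lst.headD []).length
        (borderOpen grid_lst grid_lst.length (grid_lst.headD []).length))

-- ===== PRECONDITION & SPEC =====
-- Pre_ excludes exactly the grids on which Python A raises: those where some row is
-- shorter than the first row (IndexError on grid_lst[r][c]); B raises there too.
def Pre_transform (grid_lst : List (List Int)) : Prop :=
  ∀ row ∈ grid_lst, (grid_lst.headD []).length ≤ row.length

instance (grid_lst : List (List Int)) : Decidable (Pre_transform grid_lst) := by
  unfold Pre_transform; infer_instance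

def pvWitness_transform : List (List Int) :=
  [[5, 5, 5], [5, 0, 5], [5, 5, 5]]

def Spec_transform (grid_lst : List (List Int)) (out : List (List Int)) : Prop := out = transform_alt grid_lst
instance (grid_lst : List (List Int)) (out : List (List Int)) : Decidable (Spec_transform grid_lst out) := by unfold Spec_transform; infer_instance

-- ===== CLAIM (what is proved, stated in full; the proofs are below) =====
def Claim_equal_transform : Prop := ∀ (grid_lst : List (List Int)), Dom_transform grid_lst → Pre_transform grid_lst → Spec_transform grid_lst (transform grid_lst)

-- ===== LEMMAS AND PROOFS =====

-- the common specification: a cell is reachable from the border through open cells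
def Adjc (p q : Nat × Nat) : Prop :=
  (p.1 = q.1 ∧ (p.2 = q.2 + 1 ∨ q.2 = p.2 + 1)) ∨
  (p.2 = q.2 ∧ (p.1 = q.1 + 1 ∨ q.1 = p.1 + 1))

inductive Reach (g : List (List Int)) (R C : Nat) : Nat × Nat → Prop
  | seed (p : Nat × Nat) : p.1 < R → p.2 < C → gget g p.1 p.2 = 0 →
      (p.1 = 0 ∨ p.1 = R - 1 ∨ p.2 = 0 ∨ p.2 = C - 1) → Reach g R C p
  | step (p q : Nat × Nat) : Reach g R C p → Adjc p q → q.1 < R → q.2 < C →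
      gget g q.1 q.2 = 0 → Reach g R C q

-- ---------- B side ----------

lemma mem_openCells (g : List (List Int)) (R C : Nat) (p : Nat × Nat) :
    p ∈ openCells g R C ↔ p.1 < R ∧ p.2 < C ∧ gget g p.1 p.2 = 0 := by
  simp [openCells, gget, and_assoc]

lemma mem_borderOpen (g : List (List Int)) (R C : Nat) (p : Nat × Nat) :
    p ∈ borderOpen g R C ↔
      p.1 < R ∧ p.2 < C ∧ gget g p.1 p.2 = 0 ∧
        (p.1 = 0 ∨ p.1 = R - 1 ∨ p.2 = 0 ∨ p.2 = C - 1) := by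
  simp [borderOpen, mem_openCells, and_assoc]

lemma expand_sound (g : List (List Int)) (R C : Nat) (S : Finset (Nat × Nat))
    (v : Nat × Nat) (hv : v ∈ expand g R C S) :
    v ∈ S ∨ (v.1 < R ∧ v.2 < C ∧ gget g v.1 v.2 = 0 ∧ ∃ q ∈ S, Adjc q v) := by
  rcases Finset.mem_union.1 hv with hv | hv
  · exact Or.inl hv
  · rcases Finset.mem_filter.1 hv with ⟨hop, hcond⟩
    rcases (mem_openCells g R C v).1 hop with ⟨h1, h2, h3⟩
    right
    refine ⟨h1, h2, h3, ?_⟩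
    rcases hcond with ⟨hg, hm⟩ | hm | ⟨hg, hm⟩ | hm
    · exact ⟨_, hm, Or.inr ⟨rfl, Or.inr (by simp; omega)⟩⟩
    · exact ⟨_, hm, Or.inr ⟨rfl, Or.inl rfl⟩⟩
    · exact ⟨_, hm, Or.inl ⟨rfl, Or.inr (by simp; omega)⟩⟩
    · exact ⟨_, hm, Or.inl ⟨rfl, Or.inl rfl⟩⟩

lemma expand_complete (g : List (List Int)) (R C : Nat) (S : Finset (Nat × Nat))
    (p q : Nat × Nat) (hp : p ∈ S) (hadj : Adjc p q) (hqR : q.1 < R) (hqC : q.2 < C)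
    (hop : gget g q.1 q.2 = 0) : q ∈ expand g R C S := by
  apply Finset.mem_union_right
  refine Finset.mem_filter.2 ⟨(mem_openCells g R C q).2 ⟨hqR, hqC, hop⟩, ?_⟩
  obtain ⟨a, b⟩ := p
  obtain ⟨c, d⟩ := q
  simp only [Adjc] at hadj
  rcases hadj with ⟨h1, h2 | h2⟩ | ⟨h1, h2 | h2⟩
  · -- b = d + 1 : (c, d + 1) = p
    refine Or.inr (Or.inr (Or.inr ?_))
    have : (c, d + 1) = (a, b) := by simp; omega
    rw [this]; exact hp
  · -- d = b + 1 : (c, d - 1) = p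
    refine Or.inr (Or.inr (Or.inl ⟨by omega, ?_⟩))
    have : (c, d - 1) = (a, b) := by simp; omega
    rw [this]; exact hp
  · -- a = c + 1 : (c + 1, d) = p
    refine Or.inr (Or.inl ?_)
    have : (c + 1, d) = (a, b) := by simp; omega
    rw [this]; exact hp
  · -- c = a + 1 : (c - 1, d) = p
    refine Or.inl ⟨by omega, ?_⟩
    have : (c - 1, d) = (a, b) := by simp; omega
    rw [this]; exact hp

lemma iterExpand_fix (g : List (List Int)) (R C : Nat) :
    ∀ (S : Finset (Nat × Nat)),
      expand g R C (iterExpand g R C S) = iterExpand g R C S := by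
  intro S
  induction S using iterExpand.induct g R C with
  | case1 S h =>
    rw [iterExpand, if_pos h]
    exact h
  | case2 S h ih =>
    rw [iterExpand, if_neg h]
    exact ih

lemma subset_iterExpand (g : List (List Int)) (R C : Nat) :
    ∀ (S : Finset (Nat × Nat)), S ⊆ iterExpand g R C S := by
  intro S
  induction S using iterExpand.induct g R C with
  | case1 S h =>
    rw [iterExpand, if_pos h]
  | case2 S h ih =>
    rw [iterExpand, if_neg h]
    exact Finset.Subset.trans Finset.subset_union_left ih

lemma iterExpand_sound (g : List (List Int)) (R C : Nat) :
    ∀ (S : Finset (Nat × Nat)), (∀ v ∈ S, Reach g R C v) →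
      ∀ v ∈ iterExpand g R C S, Reach g R C v := by
  intro S
  induction S using iterExpand.induct g R C with
  | case1 S h =>
    intro hS
    rw [iterExpand, if_pos h]
    exact hS
  | case2 S h ih =>
    intro hS
    rw [iterExpand, if_neg h]
    apply ih
    intro v hv
    rcases expand_sound g R C S v hv with hv | ⟨h1, h2, h3, q, hq, hadj⟩
    · exact hS v hv
    · exact Reach.step q v (hS q hq) hadj h1 h2 h3

-- B-side characterisation
lemma iterExpand_char (g : List (List Int)) (R C : Nat) (p : Nat × Nat) :
    p ∈ iterExpand g R C (borderOpen g R C) ↔ Reach g R C p := by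
  constructor
  · apply iterExpand_sound
    intro v hv
    rcases (mem_borderOpen g R C v).1 hv with ⟨h1, h2, h3, h4⟩
    exact Reach.seed v h1 h2 h3 h4
  · intro hr
    induction hr with
    | seed q h1 h2 h3 h4 =>
      exact subset_iterExpand g R C _ ((mem_borderOpen g R C q).2 ⟨h1, h2, h3, h4⟩)
    | step q v _ hadj hvR hvC hop ih =>
      have := expand_complete g R C (iterExpand g R C (borderOpen g R C)) q v ih hadj hvR hvC hop
      rwa [iterExpand_fix] at this

-- B's comprehension paints the same grid as A's copy-then-mutate
lemma paintB_eq_paint (g : List (List Int)) (C : Nat) (V : Finset (Nat × Nat)) :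
    paintB g (openCells g g.length C) V = paint g C V := by
  apply List.ext_getElem
  · simp [paintB, paint]
  · intro r h1 h2
    simp only [paintB, paint, List.getElem_map, List.getElem_zipIdx, List.getElem_mapIdx]
    have hr : r < g.length := by simpa [paintB] using h1
    apply List.ext_getElem
    · simp
    · intro c hc1 hc2
      simp only [List.getElem_map, List.getElem_zipIdx, List.getElem_mapIdx]
      have hcl : c < g[r].length := by simpa using hc1
      simp only [Nat.zero_add]
      have hmem : (r, c) ∈ openCells g g.length C ↔ c < C ∧ g[r][c] = 0 := by
        rw [mem_openCells]
        simp only [gget]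
        rw [List.getD_eq_getElem g [] hr, List.getD_eq_getElem g[r] 0 hcl]
        constructor
        · rintro ⟨-, h, h'⟩; exact ⟨h, h'⟩
        · rintro ⟨h, h'⟩; exact ⟨hr, h, h'⟩
      by_cases hco : (r, c) ∈ openCells g g.length C ∧ (r, c) ∉ V
      · rw [if_pos hco, if_pos ⟨(hmem.1 hco.1).1, (hmem.1 hco.1).2, hco.2⟩]
      · rw [if_neg hco, if_neg]
        rintro ⟨h1', h2', h3'⟩
        exact hco ⟨hmem.2 ⟨h1', h2'⟩, h3'⟩

-- ---------- A side ----------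

lemma tryAdd_subset (g : List (List Int)) (R C : Nat) (p : Nat × Nat)
    (s : Finset (Nat × Nat) × List (Nat × Nat)) (d : Int × Int) :
    s.1 ⊆ (tryAdd g R C p s d).1 := by
  unfold tryAdd
  split
  · split
    · exact Finset.subset_insert _ _
    · exact Finset.Subset.refl _
  · exact Finset.Subset.refl _

lemma tryAdd_snd (g : List (List Int)) (R C : Nat) (p : Nat × Nat)
    (s : Finset (Nat × Nat) × List (Nat × Nat)) (d : Int × Int) :
    ∃ ext, (tryAdd g R C p s d).2 = s.2 ++ ext := by
  unfold tryAdd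
  split
  · split
    · exact ⟨_, rfl⟩
    · exact ⟨[], by simp⟩
  · exact ⟨[], by simp⟩

lemma tryAdd_snd_sub (g : List (List Int)) (R C : Nat) (p : Nat × Nat)
    (s : Finset (Nat × Nat) × List (Nat × Nat)) (d : Int × Int)
    (h : ∀ x ∈ s.2, x ∈ s.1) : ∀ x ∈ (tryAdd g R C p s d).2, x ∈ (tryAdd g R C p s d).1 := by
  unfold tryAdd
  split
  · split
    · intro x hx
      rcases List.mem_append.1 hx with hx | hx
      · exact Finset.mem_insert_of_mem (h x hx)
      · simp at hx
        simp [hx]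
    · exact h
  · exact h

lemma tryAdd_sound (g : List (List Int)) (R C : Nat) (p : Nat × Nat)
    (s : Finset (Nat × Nat) × List (Nat × Nat)) (d : Int × Int) (hd : d ∈ dirs)
    (v : Nat × Nat) (hv : v ∈ (tryAdd g R C p s d).1) :
    v ∈ s.1 ∨ (v ∈ (tryAdd g R C p s d).2 ∧ v.1 < R ∧ v.2 < C ∧
      gget g v.1 v.2 = 0 ∧ Adjc p v) := by
  unfold tryAdd at hv ⊢
  split at hv
  · rename_i hb
    split at hv
    · rename_i hq
      rcases Finset.mem_insert.1 hv with rfl | hvs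
      · right
        simp only [if_pos hb, if_pos hq]
        refine ⟨by simp, by omega, by omega, hq.2, ?_⟩
        simp only [dirs, List.mem_cons, List.not_mem_nil, or_false] at hd
        unfold Adjc
        rcases hd with rfl | rfl | rfl | rfl
        · simp; try omega
        · simp; try omega
        · simp; try omega
        · simp; try omega
      · exact Or.inl hvs
    · exact Or.inl hv
  · exact Or.inl hv

lemma foldl_tryAdd_spec (g : List (List Int)) (R C : Nat) (p : Nat × Nat) :
    ∀ (l : List (Int × Int)) (s : Finset (Nat × Nat) × List (Nat × Nat)),
      (∀ d ∈ l, d ∈ dirs) →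
      s.1 ⊆ (l.foldl (tryAdd g R C p) s).1 ∧
      (∃ ext, (l.foldl (tryAdd g R C p) s).2 = s.2 ++ ext) ∧
      (∀ v ∈ (l.foldl (tryAdd g R C p) s).1, v ∈ s.1 ∨
        (v ∈ (l.foldl (tryAdd g R C p) s).2 ∧ v.1 < R ∧ v.2 < C ∧
          gget g v.1 v.2 = 0 ∧ Adjc p v)) ∧
      ((∀ x ∈ s.2, x ∈ s.1) → ∀ x ∈ (l.foldl (tryAdd g R C p) s).2,
        x ∈ (l.foldl (tryAdd g R C p) s).1) := by
  intro l
  induction l with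
  | nil =>
    intro s _
    exact ⟨Finset.Subset.refl _, ⟨[], by simp⟩, fun v hv => Or.inl hv, fun h => h⟩
  | cons d l ih =>
    intro s hl
    have hd : d ∈ dirs := hl d List.mem_cons_self
    have hrest := ih (tryAdd g R C p s d) (fun x hx => hl x (List.mem_cons_of_mem _ hx))
    rcases hrest with ⟨r1, ⟨ext, hext⟩, r3, r4⟩
    rcases tryAdd_snd g R C p s d with ⟨ext0, hext0⟩
    rw [List.foldl_cons]
    refine ⟨Finset.Subset.trans (tryAdd_subset g R C p s d) r1,
      ⟨ext0 ++ ext, by rw [hext, hext0, List.append_assoc]⟩, ?_, ?_⟩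
    · intro v hv
      rcases r3 v hv with hvs | ⟨hvq, h1, h2, h3, h4⟩
      · rcases tryAdd_sound g R C p s d hd v hvs with hvs' | ⟨hvq', h1, h2, h3, h4⟩
        · exact Or.inl hvs'
        · refine Or.inr ⟨?_, h1, h2, h3, h4⟩
          rw [hext]
          exact List.mem_append_left _ hvq'
      · exact Or.inr ⟨hvq, h1, h2, h3, h4⟩
    · intro h
      exact r4 (tryAdd_snd_sub g R C p s d h)

lemma tryAdd_mem_of (g : List (List Int)) (R C : Nat) (p : Nat × Nat)
    (s : Finset (Nat × Nat) × List (Nat × Nat)) (d : Int × Int) (q : Nat × Nat)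
    (h1 : (p.1 : Int) + d.1 = (q.1 : Int)) (h2 : (p.2 : Int) + d.2 = (q.2 : Int))
    (hqR : q.1 < R) (hqC : q.2 < C) (hop : gget g q.1 q.2 = 0) :
    q ∈ (tryAdd g R C p s d).1 := by
  unfold tryAdd
  rw [h1, h2]
  have hb : (0 : Int) ≤ (q.1 : Int) ∧ (q.1 : Int) < (R : Int) ∧
      (0 : Int) ≤ (q.2 : Int) ∧ (q.2 : Int) < (C : Int) := by omega
  rw [if_pos hb]
  simp only [Int.toNat_natCast]
  by_cases hq : (q.1, q.2) ∉ s.1 ∧ gget g q.1 q.2 = 0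
  · rw [if_pos hq]
    simp
  · rw [if_neg hq]
    have hmem : q ∈ s.1 := by
      by_contra hn
      exact hq ⟨by simpa using hn, hop⟩
    simpa using hmem

lemma foldl_tryAdd_complete (g : List (List Int)) (R C : Nat) (p : Nat × Nat)
    (s : Finset (Nat × Nat) × List (Nat × Nat)) (q : Nat × Nat)
    (hadj : Adjc p q) (hqR : q.1 < R) (hqC : q.2 < C) (hop : gget g q.1 q.2 = 0) :
    q ∈ (dirs.foldl (tryAdd g R C p) s).1 := by
  simp only [dirs, List.foldl_cons, List.foldl_nil]
  rcases hadj with ⟨h1, h2 | h2⟩ | ⟨h1, h2 | h2⟩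
  · -- p.2 = q.2 + 1 : direction (0, -1), third
    apply tryAdd_subset
    apply tryAdd_mem_of g R C p _ (0, -1) q (by simp; omega) (by simp; omega) hqR hqC hop
  · -- q.2 = p.2 + 1 : direction (0, 1), fourth
    apply tryAdd_mem_of g R C p _ (0, 1) q (by simp; omega) (by simp; omega) hqR hqC hop
  · -- p.1 = q.1 + 1 : direction (-1, 0), first
    apply tryAdd_subset
    apply tryAdd_subset
    apply tryAdd_subset
    apply tryAdd_mem_of g R C p _ (-1, 0) q (by simp; omega) (by simp; omega) hqR hqC hop
  · -- q.1 = p.1 + 1 : direction (1, 0), second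
    apply tryAdd_subset
    apply tryAdd_subset
    apply tryAdd_mem_of g R C p _ (1, 0) q (by simp; omega) (by simp; omega) hqR hqC hop

lemma bfs_spec (g : List (List Int)) (R C : Nat) :
    ∀ (V : Finset (Nat × Nat)) (Q : List (Nat × Nat)),
      (∀ x ∈ Q, x ∈ V) → (∀ v ∈ V, Reach g R C v) →
      (∀ v ∈ V, v ∉ Q → ∀ q, Adjc v q → q.1 < R → q.2 < C →
        gget g q.1 q.2 = 0 → q ∈ V) →
      V ⊆ bfs g R C V Q ∧ (∀ v ∈ bfs g R C V Q, Reach g R C v) ∧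
      (∀ v ∈ bfs g R C V Q, ∀ q, Adjc v q → q.1 < R → q.2 < C →
        gget g q.1 q.2 = 0 → q ∈ bfs g R C V Q) := by
  intro V Q
  induction V, Q using bfs.induct g R C with
  | case1 V =>
    intro _ h2 h3
    rw [bfs]
    exact ⟨Finset.Subset.refl _, h2, fun v hv q ha hr hc ho => h3 v hv (by simp) q ha hr hc ho⟩
  | case2 V p Qt st ih =>
    intro h1 h2 h3
    have hfold := foldl_tryAdd_spec g R C p dirs (V, []) (fun d hd => hd)
    rcases hfold with ⟨f1, ⟨ext, hext⟩, f3, f4⟩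
    have hpV : p ∈ V := h1 p List.mem_cons_self
    have hreachp : Reach g R C p := h2 p hpV
    have n1 : ∀ x ∈ Qt ++ st.2, x ∈ st.1 := by
      intro x hx
      rcases List.mem_append.1 hx with hx | hx
      · exact f1 (h1 x (List.mem_cons_of_mem _ hx))
      · exact f4 (by simp) x hx
    have n2 : ∀ v ∈ st.1, Reach g R C v := by
      intro v hv
      rcases f3 v hv with hvV | ⟨_, hr, hc, ho, ha⟩
      · exact h2 v hvV
      · exact Reach.step p v hreachp ha hr hc ho
    have n3 : ∀ v ∈ st.1, v ∉ Qt ++ st.2 → ∀ q, Adjc v q → q.1 < R → q.2 < C →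
        gget g q.1 q.2 = 0 → q ∈ st.1 := by
      intro v hv hnq q ha hr hc ho
      rcases f3 v hv with hvV | ⟨hvq, _, _, _, _⟩
      · by_cases hvp : v = p
        · subst hvp
          exact foldl_tryAdd_complete g R C v (V, []) q ha hr hc ho
        · have hvQt : v ∉ Qt := fun hx => hnq (List.mem_append_left _ hx)
          have : v ∉ p :: Qt := by
            intro hx
            rcases List.mem_cons.1 hx with hx | hx
            · exact hvp hx
            · exact hvQt hx
          exact f1 (h3 v hvV this q ha hr hc ho)
      · exact absurd (List.mem_append_right _ hvq) hnq
    have hres := ih n1 n2 n3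
    rw [bfs]
    exact ⟨Finset.Subset.trans (show V ⊆ st.1 from f1) hres.1, hres.2.1, hres.2.2⟩

-- seed state characterisation
lemma mem_seedFold (g : List (List Int)) :
    ∀ (ps : List (Nat × Nat)) (st : Finset (Nat × Nat) × List (Nat × Nat)) (p : Nat × Nat),
      p ∈ (seedFold g ps st).1 ↔ p ∈ st.1 ∨ (p ∈ ps ∧ gget g p.1 p.2 = 0) := by
  intro ps
  induction ps with
  | nil => intro st p; simp [seedFold]
  | cons x ps ih =>
    intro st p
    show p ∈ (seedFold g ps (if gget g x.1 x.2 = 0 then (insert x st.1, st.2 ++ [x]) else st)).1 ↔ _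
    rw [ih]
    by_cases hx : gget g x.1 x.2 = 0
    · simp only [if_pos hx, Finset.mem_insert, List.mem_cons]
      constructor
      · rintro ((rfl | h) | h)
        · exact Or.inr ⟨Or.inl rfl, hx⟩
        · exact Or.inl h
        · exact Or.inr ⟨Or.inr h.1, h.2⟩
      · rintro (h | ⟨(rfl | h), hop⟩)
        · exact Or.inl (Or.inr h)
        · exact Or.inl (Or.inl rfl)
        · exact Or.inr ⟨h, hop⟩
    · simp only [if_neg hx, List.mem_cons]
      constructor
      · rintro (h | h)
        · exact Or.inl h
        · exact Or.inr ⟨Or.inr h.1, h.2⟩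
      · rintro (h | ⟨(rfl | h), hop⟩)
        · exact Or.inl h
        · exact absurd hop hx
        · exact Or.inr ⟨h, hop⟩

lemma seedFold_snd_sub (g : List (List Int)) :
    ∀ (ps : List (Nat × Nat)) (st : Finset (Nat × Nat) × List (Nat × Nat)),
      (∀ x ∈ st.2, x ∈ st.1) → ∀ x ∈ (seedFold g ps st).2, x ∈ (seedFold g ps st).1 := by
  intro ps
  induction ps with
  | nil => intro st h; exact h
  | cons y ps ih =>
    intro st h
    show ∀ x ∈ (seedFold g ps _).2, x ∈ (seedFold g ps _).1
    apply ih
    by_cases hy : gget g y.1 y.2 = 0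
    · simp only [if_pos hy]
      intro x hx
      rcases List.mem_append.1 hx with hx | hx
      · exact Finset.mem_insert_of_mem (h x hx)
      · simp at hx; simp [hx]
    · simp only [if_neg hy]
      exact h

lemma seedFold_fst_sub_snd (g : List (List Int)) :
    ∀ (ps : List (Nat × Nat)) (st : Finset (Nat × Nat) × List (Nat × Nat)),
      (∀ x ∈ st.1, x ∈ st.2) → ∀ x ∈ (seedFold g ps st).1, x ∈ (seedFold g ps st).2 := by
  intro ps
  induction ps with
  | nil => intro st h; exact h
  | cons y ps ih =>
    intro st h
    show ∀ x ∈ (seedFold g ps _).1, x ∈ (seedFold g ps _).2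
    apply ih
    by_cases hy : gget g y.1 y.2 = 0
    · simp only [if_pos hy]
      intro x hx
      rcases Finset.mem_insert.1 hx with rfl | hx
      · exact List.mem_append_right _ (by simp)
      · exact List.mem_append_left _ (h x hx)
    · simp only [if_neg hy]
      exact h

lemma mem_seedState (g : List (List Int)) (R C : Nat) (hR : 0 < R) (hC : 0 < C)
    (p : Nat × Nat) :
    p ∈ (seedState g R C).1 ↔
      p.1 < R ∧ p.2 < C ∧ gget g p.1 p.2 = 0 ∧
        (p.1 = 0 ∨ p.1 = R - 1 ∨ p.2 = 0 ∨ p.2 = C - 1) := by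
  obtain ⟨a, b⟩ := p
  unfold seedState
  rw [mem_seedFold, mem_seedFold, mem_seedFold, mem_seedFold]
  simp only [Finset.notMem_empty, List.mem_map, List.mem_range, List.mem_range', Prod.mk.injEq]
  by_cases hop : gget g a b = 0
  · simp only [hop, and_true]
    constructor
    · rintro ((((h | ⟨c, hc, h0, hcb⟩) | ⟨c, hc, h0, hcb⟩) | ⟨r, ⟨i, hi, hri⟩, h0, hcb⟩) |
        ⟨r, ⟨i, hi, hri⟩, h0, hcb⟩)
      · exact h.elim
      · refine ⟨by omega, by omega, trivial, by omega⟩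
      · refine ⟨by omega, by omega, trivial, by omega⟩
      · refine ⟨by omega, by omega, trivial, by omega⟩
      · refine ⟨by omega, by omega, trivial, by omega⟩
    · rintro ⟨haR, hbC, -, hb⟩
      by_cases ha0 : a = 0
      · exact Or.inl (Or.inl (Or.inl (Or.inr ⟨b, hbC, by omega, rfl⟩)))
      by_cases haR1 : a = R - 1
      · exact Or.inl (Or.inl (Or.inr ⟨b, hbC, by omega, rfl⟩))
      rcases hb with h | h | h | h
      · omega
      · omega
      · exact Or.inl (Or.inr ⟨a, ⟨a - 1, by omega, by omega⟩, rfl, by omega⟩)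
      · exact Or.inr ⟨a, ⟨a - 1, by omega, by omega⟩, rfl, by omega⟩
  · simp [hop]

-- A-side characterisation
lemma bfs_char (g : List (List Int)) (R C : Nat) (hR : 0 < R) (hC : 0 < C) (p : Nat × Nat) :
    p ∈ bfs g R C (seedState g R C).1 (seedState g R C).2 ↔ Reach g R C p := by
  have hq1 : ∀ x ∈ (seedState g R C).2, x ∈ (seedState g R C).1 := by
    unfold seedState
    apply seedFold_snd_sub
    apply seedFold_snd_sub
    apply seedFold_snd_sub
    apply seedFold_snd_sub
    simp
  have hq2 : ∀ x ∈ (seedState g R C).1, x ∈ (seedState g R C).2 := by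
    unfold seedState
    apply seedFold_fst_sub_snd
    apply seedFold_fst_sub_snd
    apply seedFold_fst_sub_snd
    apply seedFold_fst_sub_snd
    simp
  have h2 : ∀ v ∈ (seedState g R C).1, Reach g R C v := by
    intro v hv
    rcases (mem_seedState g R C hR hC v).1 hv with ⟨h1', h2', h3', h4'⟩
    exact Reach.seed v h1' h2' h3' h4'
  have h3 : ∀ v ∈ (seedState g R C).1, v ∉ (seedState g R C).2 → ∀ q, Adjc v q →
      q.1 < R → q.2 < C → gget g q.1 q.2 = 0 → q ∈ (seedState g R C).1 := by
    intro v hv hnv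
    exact absurd (hq2 v hv) hnv
  rcases bfs_spec g R C (seedState g R C).1 (seedState g R C).2 hq1 h2 h3 with ⟨i1, i2, i3⟩
  constructor
  · exact i2 p
  · intro hr
    induction hr with
    | seed q h1' h2' h3' h4' => exact i1 ((mem_seedState g R C hR hC q).2 ⟨h1', h2', h3', h4'⟩)
    | step q v _ hadj hvR hvC hop ih => exact i3 q ih v hadj hvR hvC hop

-- ===== VERDICT (by name: the statement is the Claim_ definition above) =====
theorem transform_spec : Claim_equal_transform := by
  intro g _hD _hP
  unfold Spec_transform transform transform_alt
  split
  · rfl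
  · rename_i hg
    have hR : 0 < g.length := by
      rcases g with _ | _ <;> simp_all
    have hC : 0 < (g.headD []).length := by
      rcases g with _ | _ <;> simp_all [List.length_pos_iff]
    rw [paintB_eq_paint]
    congr 1
    apply Finset.ext
    intro p
    rw [bfs_char g _ _ hR hC, iterExpand_char]
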